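-- pv_equiv track=rewrite | github.com/osh5482/ER_discord_bot | functions/utill.py | insert_comma
-- ===== SOURCE A (Python) =====
-- def insert_comma(data, unit=3):
--     """세 자릿수마다 콤마 넣어주는 함수
--     반환값 : str(숫자)"""
--     data = str(data)
--     result = []
--     start = len(data) % unit
--
--     # 처음 남은 부분을 result에 추가
--     if start:
--         result.append(data[:start])
--
--     # unit 단위로 콤마 추가
--     for i in range(start, len(data), unit):
--         result.append(data[i : i + unit])
--
--     return ",".join(result)
-- ===== SOURCE B (Python) =====
-- def insert_comma(data, unit=3):
--     """Recursively peel the last `unit` digits off the right and prepend the rest."""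
--     def go(s):
--         if len(s) <= unit:
--             return s
--         return go(s[:-unit]) + "," + s[-unit:]
--     return go(str(data))
-- ===== Notes on version B (the rewrite author's own statement) =====
-- stated objective: alternative
-- what changed: B replaces A's remainder-first left-to-right range scan with a right-to-left recursion that repeatedly peels the last `unit` characters off str(data) and recurses on the prefix, so there is no modulo computation, no range loop and no special leading-chunk branch.
-- outside the precondition, e.g. on insert_comma(1234, -3): A returns '12', B raises RecursionError; on insert_comma(5, 0): A raises ZeroDivisionError, B returns ',5'
import Mathlib
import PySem

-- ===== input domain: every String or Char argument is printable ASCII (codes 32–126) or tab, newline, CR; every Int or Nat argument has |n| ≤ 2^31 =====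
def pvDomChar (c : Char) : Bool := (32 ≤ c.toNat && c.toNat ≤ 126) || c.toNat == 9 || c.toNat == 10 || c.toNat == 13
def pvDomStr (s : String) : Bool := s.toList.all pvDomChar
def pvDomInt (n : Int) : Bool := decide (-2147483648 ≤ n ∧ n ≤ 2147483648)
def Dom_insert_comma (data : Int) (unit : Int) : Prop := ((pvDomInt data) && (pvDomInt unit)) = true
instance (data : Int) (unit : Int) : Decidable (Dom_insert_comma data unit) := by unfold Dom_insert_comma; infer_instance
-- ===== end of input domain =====

-- B peels the last `unit` digits off the right recursively instead of A's
-- remainder-first left-to-right range scan; same O(n) work, proved equal for unit ≥ 1.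


-- ===== PORT A =====
def insert_comma (data : Int) (unit : Int) : String :=
  let s : List Char := PySem.Int.toChars data                -- data = str(data)
  let start : Int := PySem.Int.mod (PySem.List.len s) unit   -- start = len(data) % unit
  let result : List (List Char) :=
    if start ≠ 0 then [PySem.List.slice s none (some start)] else []   -- if start: result.append(data[:start])
  let result :=                                              -- for i in range(start, len(data), unit): result.append(data[i:i+unit])
    (PySem.List.pyRange start (PySem.List.len s) unit).foldl
      (fun acc i => acc ++ [PySem.List.slice s (some i) (some (i + unit))]) result
  String.ofList (PySem.Chars.join [','] result)              -- ",".join(result)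

-- ===== PORT B =====
-- go(s): if len(s) <= unit: return s; return go(s[:-unit]) + "," + s[-unit:]
-- fuel = len(s) bounds the recursion (each call strictly shortens s when unit ≥ 1;
-- Python's unbounded recursion would exhaust the stack exactly where fuel runs out).
def icGo (unit : Int) : Nat → List Char → List Char
  | 0, s => s
  | fuel + 1, s =>
    if (PySem.List.len s) ≤ unit then s
    else icGo unit fuel (PySem.List.slice s none (some (-unit)))
           ++ ',' :: PySem.List.slice s (some (-unit)) none

def insert_comma_alt (data : Int) (unit : Int) : String :=
  let s : List Char := PySem.Int.toChars data                -- str(data)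
  String.ofList (icGo unit s.length s)                       -- return go(str(data))

-- ===== PRECONDITION & SPEC =====
-- Pre_ excludes unit ≤ 0, outside the function's natural domain: at unit = 0 A raises
-- ZeroDivisionError (B returns ','+s), and for unit < 0 A's prefix-slice results are
-- accidents of Python's negative modulo while B recurses without bound (RecursionError).
def Pre_insert_comma (data : Int) (unit : Int) : Prop := 1 ≤ unit
instance (data : Int) (unit : Int) : Decidable (Pre_insert_comma data unit) := by unfold Pre_insert_comma; infer_instance
def pvWitness_insert_comma : Int × Int := (1234567, 3)
def Spec_insert_comma (data : Int) (unit : Int) (out : String) : Prop := out = insert_comma_alt data unit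
instance (data : Int) (unit : Int) (out : String) : Decidable (Spec_insert_comma data unit out) := by unfold Spec_insert_comma; infer_instance

-- ===== CLAIM (what is proved, stated in full; the proofs are below) =====
def Claim_equal_insert_comma : Prop := ∀ (data : Int) (unit : Int), Dom_insert_comma data unit → Pre_insert_comma data unit → Spec_insert_comma data unit (insert_comma data unit)

-- ===== LEMMAS AND PROOFS =====

-- A's chunk list, in Nat form: the leading remainder chunk then the unit-sized chunks
def chunksA (su n : Nat) (s : List Char) : List (List Char) :=
  (if n % su ≠ 0 then [s.take (n % su)] else [])
    ++ (List.range (n / su)).map (fun k => (s.drop (n % su + su * k)).take su)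

-- list(range(a, n, su)) for a positive step su, in Nat form
lemma pyRange_natCast_pos (su : Nat) (hsu : 1 ≤ su) (a n : Nat) :
    PySem.List.pyRange (a : Int) (n : Int) (su : Int)
      = (List.range ((n - a + su - 1) / su)).map (fun k => ((a + su * k : Nat) : Int)) := by
  rw [PySem.List.pyRange_of_pos _ _ (by exact_mod_cast hsu : (0:Int) < (su:Int))]
  have hc : (if (a:Int) < (n:Int) then (((n:Int) - a + su - 1) / su).toNat else 0)
      = (n - a + su - 1) / su := by
    by_cases h : (a:Int) < (n:Int)
    · rw [if_pos h]
      have he : ((n:Int) - a + su - 1) = ((n - a + su - 1 : Nat) : Int) := by omega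
      rw [he, ← Int.natCast_div, Int.toNat_natCast]
    · rw [if_neg h]
      have h1 : n - a = 0 := by omega
      rw [h1]
      exact (Nat.div_eq_of_lt (by omega)).symm
  rw [hc]
  apply List.map_congr_left
  intro k _
  push_cast
  ring

-- join with a nonempty head list: ",".join(xs + [y]) = ",".join(xs) + "," + y
lemma join_append_singleton (x : List Char) (xs : List (List Char)) (y : List Char) :
    PySem.Chars.join [','] ((x :: xs) ++ [y])
      = PySem.Chars.join [','] (x :: xs) ++ ',' :: y := by
  induction xs generalizing x with
  | nil => simp [PySem.Chars.join_cons_cons, PySem.Chars.join_singleton]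
  | cons z zs ih =>
    simp only [List.cons_append, PySem.Chars.join_cons_cons, List.append_assoc]
    exact congrArg (fun r => x ++ ([','] ++ r)) (ih z)

-- A's string in Nat-chunk form
lemma portA_chunks (data : Int) (su : Nat) (hsu : 1 ≤ su) :
    insert_comma data (su : Int)
      = String.ofList (PySem.Chars.join [',']
          (chunksA su (PySem.Int.toChars data).length (PySem.Int.toChars data))) := by
  unfold insert_comma chunksA
  simp only [PySem.List.len_eq, PySem.List.foldl_append_singleton_eq_map]
  set s : List Char := PySem.Int.toChars data with hs
  set n : Nat := s.length with hn
  rw [PySem.Int.mod_natCast n su]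
  rw [pyRange_natCast_pos su hsu (n % su) n, List.map_map]
  have hq : (n - n % su + su - 1) / su = n / su := by
    obtain ⟨Q, hQ⟩ : ∃ Q, n / su = Q := ⟨_, rfl⟩
    have hqr : su * Q + n % su = n := by rw [← hQ]; exact Nat.div_add_mod n su
    rw [hQ]
    have h1 : n - n % su + su - 1 = su * Q + (su - 1) := by
      obtain ⟨P, hP⟩ : ∃ P, su * Q = P := ⟨_, rfl⟩
      rw [hP] at hqr ⊢
      omega
    rw [h1, Nat.mul_add_div (by omega), Nat.div_eq_of_lt (by omega), Nat.add_zero]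
  rw [hq]
  have hA : ∀ k, ((fun i => PySem.List.slice s (some i) (some (i + (su:Int)))) ∘
        (fun k => ((n % su + su * k : Nat) : Int))) k = (s.drop (n % su + su * k)).take su := by
    intro k
    simp only [Function.comp_apply, PySem.List.slice_natCast_add]
  have hlead : (if ((n % su : Nat) : Int) ≠ 0 then [PySem.List.slice s none (some ((n % su : Nat) : Int))] else [])
      = (if n % su ≠ 0 then [s.take (n % su)] else []) := by
    rw [PySem.List.slice_to_natCast]
    congr 1
    simp [Int.natCast_dvd_natCast, Nat.dvd_iff_mod_eq_zero]
  rw [funext hA, hlead]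

-- chunksA is nonempty on a nonempty string
lemma chunksA_ne_nil (su n : Nat) (hsu : 1 ≤ su) (hn : 1 ≤ n) (s : List Char) :
    chunksA su n s ≠ [] := by
  unfold chunksA
  by_cases h : n % su ≠ 0
  · simp [h]
  · have hdvd : su ∣ n := Nat.dvd_of_mod_eq_zero (by omega)
    have hsn : su ≤ n := Nat.le_of_dvd (by omega) hdvd
    have hne : n / su ≠ 0 := by
      have := Nat.div_pos hsn (by omega)
      omega
    simp [h, hne]

-- peeling the last chunk of A's chunk list: for n > su,
-- chunksA n s = chunksA (n-su) (s.take (n-su)) ++ [s.drop (n-su)]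
lemma chunksA_peel (su n : Nat) (hsu : 1 ≤ su) (h1 : su < n) (s : List Char)
    (hn : s.length = n) :
    chunksA su n s = chunksA su (n - su) (s.take (n - su)) ++ [s.drop (n - su)] := by
  unfold chunksA
  set t := s.take (n - su) with htdef
  set last := s.drop (n - su) with hldef
  have ht : t.length = n - su := by rw [htdef, List.length_take]; omega
  have hl : last.length = su := by rw [hldef, List.length_drop]; omega
  have hqr : su * ((n - su) / su) + (n - su) % su = n - su := Nat.div_add_mod _ _
  have hmod : n % su = (n - su) % su := by
    conv_lhs => rw [show n = (n - su) + su by omega]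
    rw [Nat.add_mod_right]
  have hdiv : n / su = (n - su) / su + 1 := by
    conv_lhs => rw [show n = (n - su) + su by omega]
    rw [Nat.add_div_right _ (by omega)]
  rw [hmod, hdiv]
  have hchunk : ∀ k ∈ List.range ((n - su) / su),
      (s.drop ((n - su) % su + su * k)).take su = (t.drop ((n - su) % su + su * k)).take su := by
    intro k hk
    rw [List.mem_range] at hk
    have ha : su * k + su ≤ su * ((n - su) / su) := by
      calc su * k + su = su * (k + 1) := by ring
      _ ≤ su * ((n - su) / su) := Nat.mul_le_mul_left _ (by omega)
    rw [htdef, List.drop_take, List.take_take]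
    congr 1
    omega
  have hlastchunk : (s.drop ((n - su) % su + su * ((n - su) / su))).take su = last := by
    have hx : (n - su) % su + su * ((n - su) / su) = n - su := by omega
    rw [hx, ← hldef]
    exact List.take_of_length_le (by omega)
  have hlead : s.take ((n - su) % su) = t.take ((n - su) % su) := by
    rw [htdef, List.take_take]
    congr 1
    have := Nat.mod_le (n - su) su
    omega
  rw [List.range_succ, List.map_append, List.map_congr_left hchunk, hlead]
  simp only [List.map_cons, List.map_nil, hlastchunk]
  rw [List.append_assoc]

-- the heart: B's right-peeling recursion computes ",".join of A's chunk list
lemma icGo_eq_join (su : Nat) (hsu : 1 ≤ su) : ∀ (n : Nat) (s : List Char), s.length = n →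
    ∀ fuel, n ≤ fuel → icGo (su : Int) fuel s = PySem.Chars.join [','] (chunksA su n s) := by
  intro n
  induction n using Nat.strong_induction_on with
  | _ n IH =>
  intro s hn fuel hfuel
  cases fuel with
  | zero =>
    have h0 : n = 0 := by omega
    subst h0
    have hs : s = [] := List.eq_nil_of_length_eq_zero hn
    subst hs
    simp [icGo, chunksA, Nat.zero_div, PySem.Chars.join_nil]
  | succ f =>
    rw [icGo]
    by_cases hle : n ≤ su
    · rw [if_pos (by simp [PySem.List.len_eq, hn]; exact_mod_cast hle)]
      by_cases h0 : n = 0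
      · subst h0
        have hs : s = [] := List.eq_nil_of_length_eq_zero hn
        subst hs
        simp [chunksA, Nat.zero_div, PySem.Chars.join_nil]
      · unfold chunksA
        by_cases he : n = su
        · have hmod : n % su = 0 := by rw [he]; exact Nat.mod_self su
          have hdiv : n / su = 1 := by rw [he]; exact Nat.div_self (by omega)
          rw [hmod, hdiv]
          simp [PySem.Chars.join_singleton,
            List.take_of_length_le (show s.length ≤ su by omega)]
        · have hmod : n % su = n := Nat.mod_eq_of_lt (by omega)
          have hdiv : n / su = 0 := Nat.div_eq_of_lt (by omega)
          rw [hmod, hdiv]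
          simp [h0, PySem.Chars.join_singleton,
            List.take_of_length_le (show s.length ≤ n by omega)]
    · rw [Nat.not_le] at hle
      rw [if_neg (by simp [PySem.List.len_eq, hn]; exact_mod_cast hle)]
      rw [PySem.List.slice_to_neg_natCast (k := su) s (by omega),
        PySem.List.slice_from_neg_natCast (k := su) s (by omega), hn]
      have ht : (s.take (n - su)).length = n - su := by rw [List.length_take]; omega
      rw [IH (n - su) (by omega) (s.take (n - su)) ht f (by omega)]
      rw [chunksA_peel su n hsu hle s hn]
      obtain ⟨x, xs, hx⟩ := List.exists_cons_of_ne_nil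
        (chunksA_ne_nil su (n - su) hsu (by omega) (s.take (n - su)))
      rw [hx, join_append_singleton]

lemma ports_eq (data unit : Int) (h : 1 ≤ unit) :
    insert_comma data unit = insert_comma_alt data unit := by
  obtain ⟨su, rfl⟩ : ∃ su : Nat, unit = (su : Int) :=
    ⟨unit.toNat, (Int.toNat_of_nonneg (by omega)).symm⟩
  have hsu : 1 ≤ su := by exact_mod_cast h
  rw [portA_chunks data su hsu]
  show _ = String.ofList (icGo (su:Int) (PySem.Int.toChars data).length (PySem.Int.toChars data))
  rw [icGo_eq_join su hsu (PySem.Int.toChars data).length (PySem.Int.toChars data) rfl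
    (PySem.Int.toChars data).length (le_refl _)]

-- ===== VERDICT (by name: the statement is the Claim_ definition above) =====
theorem insert_comma_spec : Claim_equal_insert_comma := by
  intro data unit _ hpre
  exact ports_eq data unit hpre
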